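-- pv_equiv track=rewrite | github.com/adminEfaci/zzday | backend/app/modules/identity/application/commands/authentication/refresh_token_command.py | _is_similar_user_agent
-- ===== SOURCE A (Python) =====
-- def _is_similar_user_agent(ua1: str, ua2: str) -> bool:
--     """Check if user agents are similar enough."""
--     # Simple check - in production would use proper UA parsing
--     # Allow minor version changes but not major browser/OS changes
--     ua1_parts = ua1.lower().split()
--     ua2_parts = ua2.lower().split()
--
--     # Check if major components match (browser, OS)
--     major_components = ['chrome', 'firefox', 'safari', 'edge', 'windows', 'mac', 'linux']
--
--     for component in major_components:
--         in_ua1 = any(component in part for part in ua1_parts)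
--         in_ua2 = any(component in part for part in ua2_parts)
--         if in_ua1 != in_ua2:
--             return False
--
--     return True
-- ===== SOURCE B (Python) =====
-- def _is_similar_user_agent(ua1: str, ua2: str) -> bool:
--     """Check if user agents are similar enough."""
--     # Position-major multi-pattern scan: walk each lowered string once and at
--     # every position record which major components START there, accumulating a
--     # set of components present; the UAs are similar iff the two sets are equal.
--     # Correct because a component (whitespace-free) occurs in some split() part
--     # iff it starts at some position of the whole lowered string.
--     comps = ('chrome', 'firefox', 'safari', 'edge', 'windows', 'mac', 'linux')
--
--     def found(ua):
--         s = ua.lower()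
--         hits = set()
--         for i in range(len(s) + 1):
--             for c in comps:
--                 if s.startswith(c, i):
--                     hits.add(c)
--         return hits
--
--     return found(ua1) == found(ua2)
-- ===== Notes on version B (the rewrite author's own statement) =====
-- stated objective: alternative
-- what changed: B replaces A's component-major loop (split the UA, per component an any-substring test with early return) by a position-major single scan of each whole lowered string that collects the set of components starting at each position, then compares the two hit-sets for equality.
import Mathlib
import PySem

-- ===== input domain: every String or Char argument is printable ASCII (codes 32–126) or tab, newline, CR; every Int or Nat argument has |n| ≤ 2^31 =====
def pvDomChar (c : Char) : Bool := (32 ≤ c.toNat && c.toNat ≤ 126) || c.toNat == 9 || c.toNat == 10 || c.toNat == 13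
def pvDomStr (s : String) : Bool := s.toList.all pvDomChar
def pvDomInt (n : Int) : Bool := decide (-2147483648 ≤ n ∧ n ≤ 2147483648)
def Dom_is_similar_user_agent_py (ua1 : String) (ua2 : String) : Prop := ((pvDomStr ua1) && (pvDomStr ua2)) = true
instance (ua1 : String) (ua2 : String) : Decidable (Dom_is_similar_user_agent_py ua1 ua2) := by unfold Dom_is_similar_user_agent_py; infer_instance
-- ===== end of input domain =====

-- B replaces A's component-major split/any loop by a position-major scan of each
-- whole lowered string collecting the set of components that start at each
-- position, then compares the two hit-sets (alternative algorithm, same cost).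


-- ===== PORT A =====
-- the for-loop over major_components with its early `return False`
def pvLoopA (comps : List String) (p1 p2 : List String) : Bool :=
  match comps with
  | [] => true
  | comp :: rest =>
    let in_ua1 := p1.any (fun part => PySem.Str.isIn comp part)
    let in_ua2 := p2.any (fun part => PySem.Str.isIn comp part)
    if in_ua1 != in_ua2 then false else pvLoopA rest p1 p2

def is_similar_user_agent_py (ua1 : String) (ua2 : String) : Bool :=
  let ua1_parts := PySem.Str.split₀ (PySem.Str.lower ua1)
  let ua2_parts := PySem.Str.split₀ (PySem.Str.lower ua2)
  pvLoopA ["chrome", "firefox", "safari", "edge", "windows", "mac", "linux"] ua1_parts ua2_parts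

-- ===== PORT B =====
-- B's tuple  comps = ('chrome', …, 'linux')
def pvComps : List String := ["chrome", "firefox", "safari", "edge", "windows", "mac", "linux"]

-- B's helper found(ua): for i in range(len(s)+1): for c in comps: if s.startswith(c, i): hits.add(c)
-- s.startswith(c, i) is ported by hand as `c <+: s[i:]` (exact for 0 ≤ i, which pyRange guarantees)
def pvFound (ua : String) : PySem.Set String :=
  let s := PySem.Str.lower ua
  (PySem.List.pyRange 0 (PySem.Str.len s + 1) 1).foldl
    (fun hits i => pvComps.foldl
      (fun hits c =>
        if PySem.Chars.startswith (s.toList.drop i.toNat) c.toList then PySem.Set.add hits c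
        else hits)
      hits)
    PySem.Set.empty

def is_similar_user_agent_py_alt (ua1 : String) (ua2 : String) : Bool :=
  PySem.Set.equal (pvFound ua1) (pvFound ua2)

-- ===== PRECONDITION & SPEC =====
def Spec_is_similar_user_agent_py (ua1 : String) (ua2 : String) (out : Bool) : Prop := out = is_similar_user_agent_py_alt ua1 ua2
instance (ua1 : String) (ua2 : String) (out : Bool) : Decidable (Spec_is_similar_user_agent_py ua1 ua2 out) := by unfold Spec_is_similar_user_agent_py; infer_instance

-- ===== CLAIM (what is proved, stated in full; the proofs are below) =====
def Claim_equal_is_similar_user_agent_py : Prop := ∀ (ua1 : String) (ua2 : String), Dom_is_similar_user_agent_py ua1 ua2 → Spec_is_similar_user_agent_py ua1 ua2 (is_similar_user_agent_py ua1 ua2)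

-- ===== LEMMAS AND PROOFS =====

-- a pattern not containing `c` is a prefix of `xs ++ c :: ys` only within `xs`
lemma pv_prefix_append_cons {comp xs ys : List Char} {c : Char}
    (h : comp <+: xs ++ c :: ys) (hc : c ∉ comp) : comp <+: xs := by
  by_cases hle : comp.length ≤ xs.length
  · have h1 : comp = (xs ++ c :: ys).take comp.length := by
      obtain ⟨t, ht⟩ := h
      rw [← ht]; simp
    rw [h1, List.take_append_of_le_length hle]
    exact List.take_prefix _ _
  · exfalso
    rw [not_le] at hle
    obtain ⟨t, ht⟩ := h
    have h3 : (xs ++ c :: ys)[xs.length]? = some c := by simp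
    rw [← ht, List.getElem?_append_left (by omega)] at h3
    exact hc (List.mem_of_getElem? h3)

-- an occurrence of a `c`-free pattern in `xs ++ c :: ys` lies in `xs` or in `ys`
lemma pv_infix_append_cons {comp : List Char} {c : Char} (hc : c ∉ comp) (xs ys : List Char) :
    comp <:+: xs ++ c :: ys ↔ comp <:+: xs ∨ comp <:+: ys := by
  constructor
  · intro h
    induction xs with
    | nil =>
      rw [List.nil_append, List.infix_cons_iff] at h
      rcases h with h | h
      · cases comp with
        | nil => exact Or.inl List.nil_infix
        | cons a l =>
          obtain ⟨t, ht⟩ := h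
          simp at ht
          exact absurd (ht.1 ▸ List.mem_cons_self) hc
      · exact Or.inr h
    | cons a xs' ih =>
      rw [List.cons_append, List.infix_cons_iff] at h
      rcases h with h | h
      · exact Or.inl ((pv_prefix_append_cons (xs := a :: xs') h hc).isInfix)
      · rcases ih h with h2 | h2
        · exact Or.inl (h2.trans (List.suffix_cons a xs').isInfix)
        · exact Or.inr h2
  · rintro (h | h)
    · exact h.trans (List.prefix_append _ _).isInfix
    · exact h.trans ((List.suffix_cons c ys).trans (List.suffix_append _ _)).isInfix

lemma pv_isIn_append_cons {comp : List Char} {c : Char} (hc : c ∉ comp) (xs ys : List Char) :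
    PySem.Chars.isIn comp (xs ++ c :: ys)
      = (PySem.Chars.isIn comp xs || PySem.Chars.isIn comp ys) := by
  rw [Bool.eq_iff_iff]
  simp only [Bool.or_eq_true, PySem.Chars.isIn_iff_infix]
  exact pv_infix_append_cons hc xs ys

lemma pv_isIn_nil {comp : List Char} (h : comp ≠ []) : PySem.Chars.isIn comp [] = false := by
  rw [PySem.Chars.isIn_eq_false_iff]
  intro hinf
  exact h (List.eq_nil_of_infix_nil hinf)

-- invariant of split₀.go : `comp` occurs in some produced part iff it occurs
-- in some finished word of `acc` or in the remaining text `cur.reverse ++ s`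
lemma pv_go_any (comp : List Char) (hne : comp ≠ [])
    (hws : ∀ c ∈ comp, PySem.Chars.isspace c = false) :
    ∀ (s cur : List Char) (acc : List (List Char)),
      (PySem.Chars.split₀.go s cur acc).any (fun part => PySem.Chars.isIn comp part)
        = (acc.any (fun w => PySem.Chars.isIn comp w)
            || PySem.Chars.isIn comp (cur.reverse ++ s)) := by
  intro s
  induction s with
  | nil =>
    intro cur acc
    simp only [PySem.Chars.split₀.go]
    by_cases hcur : cur.isEmpty
    · have : cur = [] := by simpa [List.isEmpty_iff] using hcur
      subst this
      simp [hcur, List.any_reverse, pv_isIn_nil hne]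
    · simp [hcur, List.any_reverse, Bool.or_comm]
  | cons c rest ih =>
    intro cur acc
    simp only [PySem.Chars.split₀.go]
    by_cases hsp : PySem.Chars.isspace c
    · have hc : c ∉ comp := fun hmem => absurd (hws c hmem) (by simp [hsp])
      have hsplit : PySem.Chars.isIn comp (cur.reverse ++ c :: rest)
          = (PySem.Chars.isIn comp cur.reverse || PySem.Chars.isIn comp rest) :=
        pv_isIn_append_cons hc _ _
      by_cases hcur : cur.isEmpty
      · have hnil : cur = [] := by simpa [List.isEmpty_iff] using hcur
        subst hnil
        simp only [List.reverse_nil, List.nil_append] at hsplit ⊢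
        rw [hsplit, pv_isIn_nil hne, Bool.false_or]
        simp [hsp, hcur, ih]
      · rw [hsplit]
        simp [hsp, hcur, ih, Bool.or_comm, Bool.or_left_comm]
    · have hrw : (c :: cur).reverse ++ rest = cur.reverse ++ c :: rest := by simp
      rw [← hrw]
      simp [hsp, ih]

-- `comp in some part of s.split()` = `comp in s`, for whitespace-free nonempty comp
lemma pv_any_split (comp : String) (hne : comp.toList ≠ [])
    (hws : ∀ c ∈ comp.toList, PySem.Chars.isspace c = false) (s : String) :
    (PySem.Str.split₀ s).any (fun part => PySem.Str.isIn comp part)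
      = PySem.Str.isIn comp s := by
  have h := pv_go_any comp.toList hne hws s.toList [] []
  have hmap : (PySem.Str.split₀ s).map String.toList = PySem.Chars.split₀ s.toList :=
    PySem.Str.split₀_map_toList s
  calc (PySem.Str.split₀ s).any (fun part => PySem.Str.isIn comp part)
      = ((PySem.Str.split₀ s).map String.toList).any
          (fun part => PySem.Chars.isIn comp.toList part) := by
        rw [List.any_map]
        simp only [PySem.Str.isIn_eq]
        rfl
    _ = PySem.Str.isIn comp s := by
        rw [hmap]
        unfold PySem.Chars.split₀
        rw [h]
        simp [PySem.Str.isIn_eq]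

-- A's early-return loop returns true iff presence agrees on every component
lemma pv_loopA_iff (comps : List String) (p1 p2 : List String) :
    pvLoopA comps p1 p2 = true
      ↔ ∀ c ∈ comps, p1.any (fun part => PySem.Str.isIn c part)
          = p2.any (fun part => PySem.Str.isIn c part) := by
  induction comps with
  | nil => simp [pvLoopA]
  | cons c rest ih =>
    simp only [pvLoopA, bne_iff_ne, ne_eq, ite_not]
    by_cases h : p1.any (fun part => PySem.Str.isIn c part)
        = p2.any (fun part => PySem.Str.isIn c part)
    · rw [if_pos h, ih]
      constructor
      · intro hall x hx
        rcases List.mem_cons.mp hx with rfl | hx'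
        · exact h
        · exact hall x hx'
      · intro hall x hx
        exact hall x (List.mem_cons_of_mem c hx)
    · rw [if_neg h]
      simp only [Bool.false_eq_true, false_iff, not_forall]
      exact ⟨c, List.mem_cons_self, h⟩

-- membership in B's inner fold over the component tuple
lemma pv_mem_inner (cs : List String) (p : String → Bool) :
    ∀ (acc : PySem.Set String) (y : String),
      y ∈ cs.foldl (fun hits c => if p c then PySem.Set.add hits c else hits) acc
        ↔ y ∈ acc ∨ (y ∈ cs ∧ p y = true) := by
  induction cs with
  | nil => simp
  | cons c rest ih =>
    intro acc y
    simp only [List.foldl_cons]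
    by_cases hp : p c
    · rw [if_pos hp, ih, PySem.Set.mem_add]
      constructor
      · rintro (⟨h | rfl⟩ | ⟨hm, hy⟩)
        · exact Or.inl h
        · exact Or.inr ⟨List.mem_cons_self, hp⟩
        · exact Or.inr ⟨List.mem_cons_of_mem c hm, hy⟩
      · rintro (h | ⟨hm, hy⟩)
        · exact Or.inl (Or.inl h)
        · rcases List.mem_cons.mp hm with rfl | hm'
          · exact Or.inl (Or.inr rfl)
          · exact Or.inr ⟨hm', hy⟩
    · rw [if_neg hp, ih]
      constructor
      · rintro (h | ⟨hm, hy⟩)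
        · exact Or.inl h
        · exact Or.inr ⟨List.mem_cons_of_mem c hm, hy⟩
      · rintro (h | ⟨hm, hy⟩)
        · exact Or.inl h
        · rcases List.mem_cons.mp hm with rfl | hm'
          · exact absurd hy hp
          · exact Or.inr ⟨hm', hy⟩

-- membership in B's outer fold over the position range
lemma pv_mem_outer (R : List Int) (q : String → Int → Bool) :
    ∀ (acc : PySem.Set String) (y : String),
      y ∈ R.foldl (fun hits i => pvComps.foldl
            (fun hits c => if q c i then PySem.Set.add hits c else hits) hits) acc
        ↔ y ∈ acc ∨ (y ∈ pvComps ∧ ∃ i ∈ R, q y i = true) := by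
  induction R with
  | nil => simp
  | cons i rest ih =>
    intro acc y
    simp only [List.foldl_cons]
    rw [ih, pv_mem_inner]
    constructor
    · rintro (⟨h | ⟨hm, hq⟩⟩ | ⟨hm, j, hj, hq⟩)
      · exact Or.inl h
      · exact Or.inr ⟨hm, i, List.mem_cons_self, hq⟩
      · exact Or.inr ⟨hm, j, List.mem_cons_of_mem i hj, hq⟩
    · rintro (h | ⟨hm, j, hj, hq⟩)
      · exact Or.inl (Or.inl h)
      · rcases List.mem_cons.mp hj with rfl | hj'
        · exact Or.inl (Or.inr ⟨hm, hq⟩)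
        · exact Or.inr ⟨hm, j, hj', hq⟩

-- each major component is nonempty and whitespace-free
lemma pv_comps_ok_bool : pvComps.all
    (fun c => !c.toList.isEmpty && c.toList.all (fun ch => !PySem.Chars.isspace ch)) = true := by rfl

lemma pv_comps_ok : ∀ c ∈ pvComps,
    c.toList ≠ [] ∧ ∀ ch ∈ c.toList, PySem.Chars.isspace ch = false := by
  intro c hc
  have h := List.all_eq_true.mp pv_comps_ok_bool c hc
  simp only [Bool.and_eq_true, Bool.not_eq_true', List.all_eq_true, List.isEmpty_eq_false_iff] at h
  exact ⟨h.1, h.2⟩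

-- characterisation of B's hit-set: exactly the components occurring in the lowered string
lemma pv_mem_found (ua : String) (y : String) :
    y ∈ pvFound ua ↔ y ∈ pvComps ∧ PySem.Str.isIn y (PySem.Str.lower ua) = true := by
  unfold pvFound
  rw [pv_mem_outer]
  simp only [PySem.Set.empty, List.not_mem_nil, false_or]
  constructor
  · rintro ⟨hm, i, hi, hq⟩
    refine ⟨hm, ?_⟩
    rw [PySem.Str.isIn_eq, ← PySem.Chars.exists_prefix_drop_iff_isIn]
    exact ⟨i.toNat, (PySem.Chars.startswith_iff _ _).mp hq⟩
  · rintro ⟨hm, hin⟩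
    refine ⟨hm, ?_⟩
    rw [PySem.Str.isIn_eq, ← PySem.Chars.exists_prefix_drop_iff_isIn] at hin
    obtain ⟨j, hj⟩ := hin
    have hne : y.toList ≠ [] := (pv_comps_ok y hm).1
    have hjlt : j < (PySem.Str.lower ua).toList.length := by
      by_contra hge
      rw [List.drop_eq_nil_of_le (by omega)] at hj
      exact hne (List.prefix_nil.mp hj)
    refine ⟨(j : Int), ?_, ?_⟩
    · rw [PySem.List.mem_pyRange_one]
      have : (PySem.Str.len (PySem.Str.lower ua)) = ((PySem.Str.lower ua).toList.length : Int) := by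
        simp [PySem.Str.len_eq]
      omega
    · rw [PySem.Chars.startswith_iff]
      simpa using hj

-- ===== VERDICT (by name: the statement is the Claim_ definition above) =====
theorem is_similar_user_agent_py_spec : Claim_equal_is_similar_user_agent_py := by
  intro ua1 ua2 _hdom
  unfold Spec_is_similar_user_agent_py is_similar_user_agent_py is_similar_user_agent_py_alt
  rw [Bool.eq_iff_iff, pv_loopA_iff, PySem.Set.equal_iff]
  constructor
  · intro hall y
    rw [pv_mem_found, pv_mem_found]
    constructor <;> rintro ⟨hm, hin⟩ <;> refine ⟨hm, ?_⟩
    · rw [← pv_any_split y (pv_comps_ok y hm).1 (pv_comps_ok y hm).2,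
        ← hall y hm, pv_any_split y (pv_comps_ok y hm).1 (pv_comps_ok y hm).2]
      exact hin
    · rw [← pv_any_split y (pv_comps_ok y hm).1 (pv_comps_ok y hm).2,
        hall y hm, pv_any_split y (pv_comps_ok y hm).1 (pv_comps_ok y hm).2]
      exact hin
  · intro hset c hc
    have h := hset c
    rw [pv_mem_found, pv_mem_found] at h
    rw [pv_any_split c (pv_comps_ok c hc).1 (pv_comps_ok c hc).2,
      pv_any_split c (pv_comps_ok c hc).1 (pv_comps_ok c hc).2]
    rw [Bool.eq_iff_iff]
    constructor <;> intro hin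
    · exact (h.mp ⟨hc, hin⟩).2
    · exact (h.mpr ⟨hc, hin⟩).2
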